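-- pv_equiv track=rewrite | github.com/RyanButler53/mathler-solver | mathler.py | concatenateExp
-- ===== SOURCE A (Python) =====
-- OPERATORS = ['+', '-', '*', '/']
--
-- def concatenateExp(exp):
--     exp = [str(x) for x in exp] #make it a string, for testing purposes
--     concatenated = [] #concatenated
--     i = 0
--     while i < 6: #concatenates the numbers
--         if exp[i] in OPERATORS:
--             concatenated.append(exp[i])
--             i += 1
--         else:
--             numLength = 0
--             num = ''
--             #go until operator or end found
--             while i + numLength < 6 and exp[i + numLength] not in OPERATORS:
--                 num += exp[i + numLength]
--                 numLength += 1
--             concatenated.append(num)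
--             i += numLength
--     return concatenated
-- ===== SOURCE B (Python) =====
-- OPERATORS = ['+', '-', '*', '/']
--
-- def concatenateExp(exp):
--     exp = [str(x) for x in exp]
--     ops = [i for i in range(6) if exp[i] in OPERATORS]
--     out = []
--     prev = 0
--     for p in ops:
--         if p > prev:
--             out.append(''.join(exp[prev:p]))
--         out.append(exp[p])
--         prev = p + 1
--     if prev < 6:
--         out.append(''.join(exp[prev:6]))
--     return out
-- ===== Notes on version B (the rewrite author's own statement) =====
-- stated objective: alternative
-- what changed: B first builds the table of operator positions in [0,6) and then reconstructs the token list by joining the slices between consecutive delimiters, replacing A's nested consume-while scan with a position-table + slice-between-delimiters pass.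
import Mathlib
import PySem

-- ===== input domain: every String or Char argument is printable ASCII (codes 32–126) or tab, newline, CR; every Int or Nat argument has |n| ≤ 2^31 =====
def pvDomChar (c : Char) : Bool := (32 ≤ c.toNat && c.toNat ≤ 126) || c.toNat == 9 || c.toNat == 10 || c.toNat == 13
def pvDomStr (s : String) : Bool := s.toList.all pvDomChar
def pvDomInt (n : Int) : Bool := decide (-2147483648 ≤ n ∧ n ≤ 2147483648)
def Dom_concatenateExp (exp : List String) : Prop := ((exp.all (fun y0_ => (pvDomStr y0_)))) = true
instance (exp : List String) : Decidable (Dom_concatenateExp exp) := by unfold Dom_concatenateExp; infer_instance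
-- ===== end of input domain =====

-- B re-groups the 6-element expression by first computing the operator-position table and
-- slicing between delimiters, instead of A's nested consume-while loop (objective: alternative).

-- ===== PORT A =====
def OPERATORS : List String := ["+", "-", "*", "/"]

-- inner `while i + numLength < 6 and exp[i+numLength] not in OPERATORS` loop of A.
-- `exp[k]` is ported as `exp.getD k ""`: exact under Pre_ (length ≥ 6, every accessed k < 6).
-- fuel is only a structural totality guard: the loop runs at most 6 iterations, and when
-- fuel 6 runs out the guard `i + numLength < 6` is false anyway, so fuel 6 is exact.
def innerA (exp : List String) : Nat → Nat → Nat → String → String × Nat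
  | 0, _, numLength, num => (num, numLength)
  | fuel + 1, i, numLength, num =>
    if i + numLength < 6 ∧ exp.getD (i + numLength) "" ∉ OPERATORS then
      innerA exp fuel i (numLength + 1) (num ++ exp.getD (i + numLength) "")
    else (num, numLength)

-- outer `while i < 6` loop of A (`concatenated` is the accumulator); fuel 6 is again only a
-- structural totality guard (i grows by ≥ 1 per iteration, so at fuel 0 the guard is false)
def outerA (exp : List String) : Nat → Nat → List String → List String
  | 0, _, concatenated => concatenated
  | fuel + 1, i, concatenated =>
    if i < 6 then
      if exp.getD i "" ∈ OPERATORS then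
        outerA exp fuel (i + 1) (concatenated ++ [exp.getD i ""])
      else
        let r := innerA exp 6 i 0 ""   -- (num, numLength)
        outerA exp fuel (i + r.2) (concatenated ++ [r.1])
    else concatenated

-- `exp = [str(x) for x in exp]` is the identity on List String
def concatenateExp (exp : List String) : List String := outerA exp 6 0 []

-- ===== PORT B =====
-- loop body of B's `for p in ops`; state = (prev, out); `exp[prev:p]` (0 ≤ prev ≤ p) as take/drop
def stepB (exp : List String) (st : Nat × List String) (p : Nat) : Nat × List String :=
  let out := if st.1 < p then st.2 ++ [String.join ((exp.drop st.1).take (p - st.1))] else st.2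
  (p + 1, out ++ [exp.getD p ""])

def concatenateExp_alt (exp : List String) : List String :=
  let ops := (List.range 6).filter (fun i => exp.getD i "" ∈ OPERATORS)
  let r := ops.foldl (stepB exp) (0, [])
  if r.1 < 6 then r.2 ++ [String.join ((exp.drop r.1).take (6 - r.1))] else r.2

-- ===== PRECONDITION & SPEC =====
-- A (and B) raise IndexError on lists of fewer than 6 elements; both read only indices 0..5.
def Pre_concatenateExp (exp : List String) : Prop := 6 ≤ exp.length
instance (exp : List String) : Decidable (Pre_concatenateExp exp) := by
  unfold Pre_concatenateExp; infer_instance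

def pvWitness_concatenateExp : List String := ["1", "2", "+", "3", "4", "5"]

def Spec_concatenateExp (exp : List String) (out : List String) : Prop := out = concatenateExp_alt exp
instance (exp : List String) (out : List String) : Decidable (Spec_concatenateExp exp out) := by
  unfold Spec_concatenateExp; infer_instance

-- ===== CLAIM (what is proved, stated in full; the proofs are below) =====
def Claim_equal_concatenateExp : Prop := ∀ (exp : List String), Dom_concatenateExp exp → Pre_concatenateExp exp → Spec_concatenateExp exp (concatenateExp exp)

-- ===== LEMMAS AND PROOFS =====

-- first index j ≥ m stopping at 6 or at an operator (same fuel discipline as innerA)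
def firstStop (exp : List String) : Nat → Nat → Nat
  | 0, m => m
  | fuel + 1, m =>
    if m < 6 ∧ exp.getD m "" ∉ OPERATORS then firstStop exp fuel (m + 1) else m

-- concatenation of the non-operator run starting at m
def joinRun (exp : List String) : Nat → Nat → String
  | 0, _ => ""
  | fuel + 1, m =>
    if m < 6 ∧ exp.getD m "" ∉ OPERATORS then exp.getD m "" ++ joinRun exp fuel (m + 1) else ""

-- operator positions in [m, 6)
def Lops (exp : List String) (m : Nat) : List Nat :=
  (List.range' m (6 - m)).filter (fun k => exp.getD k "" ∈ OPERATORS)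

-- B's computation resumed from position m with accumulator out
def Bfrom (exp : List String) (m : Nat) (out : List String) : List String :=
  let r := (Lops exp m).foldl (stepB exp) (m, out)
  if r.1 < 6 then r.2 ++ [String.join ((exp.drop r.1).take (6 - r.1))] else r.2

theorem firstStop_ge (exp : List String) :
    ∀ (fuel m : Nat), m ≤ firstStop exp fuel m := by
  intro fuel
  induction fuel with
  | zero => intro m; exact Nat.le_refl m
  | succ fuel ih =>
    intro m
    unfold firstStop
    split
    · exact Nat.le_trans (Nat.le_succ m) (ih (m + 1))
    · exact Nat.le_refl m

theorem firstStop_le (exp : List String) :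
    ∀ (fuel m : Nat), m ≤ 6 → firstStop exp fuel m ≤ 6 := by
  intro fuel
  induction fuel with
  | zero => intro m h; exact h
  | succ fuel ih =>
    intro m h
    unfold firstStop
    split
    · rename_i hc; exact ih (m + 1) (by omega)
    · exact h

theorem firstStop_stop (exp : List String) :
    ∀ (fuel m : Nat), 6 ≤ m + fuel →
      6 ≤ firstStop exp fuel m ∨ exp.getD (firstStop exp fuel m) "" ∈ OPERATORS := by
  intro fuel
  induction fuel with
  | zero => intro m h; left; simpa [firstStop] using (by omega : 6 ≤ m)
  | succ fuel ih =>
    intro m h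
    unfold firstStop
    split
    · exact ih (m + 1) (by omega)
    · rename_i hc
      by_cases h6 : m < 6
      · right; by_contra hop; exact hc ⟨h6, hop⟩
      · left; omega

theorem firstStop_gt (exp : List String) (fuel m : Nat) (h : m < 6)
    (h2 : exp.getD m "" ∉ OPERATORS) : m + 1 ≤ firstStop exp (fuel + 1) m := by
  unfold firstStop
  rw [if_pos ⟨h, h2⟩]
  exact firstStop_ge exp fuel (m + 1)

theorem range'_six_cons (m : Nat) (h : m < 6) :
    List.range' m (6 - m) = m :: List.range' (m + 1) (6 - (m + 1)) := by
  have : 6 - m = (6 - (m + 1)) + 1 := by omega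
  rw [this, List.range'_succ]

theorem Lops_cons (exp : List String) (m : Nat) (h : m < 6)
    (hP : exp.getD m "" ∈ OPERATORS) :
    Lops exp m = m :: Lops exp (m + 1) := by
  unfold Lops
  rw [range'_six_cons m h, List.filter_cons, if_pos (by simpa using hP)]

theorem Lops_skip (exp : List String) (m : Nat) (h : m < 6)
    (hP : exp.getD m "" ∉ OPERATORS) :
    Lops exp m = Lops exp (m + 1) := by
  unfold Lops
  rw [range'_six_cons m h, List.filter_cons, if_neg (by simpa using hP)]

theorem Lops_firstStop (exp : List String) :
    ∀ (fuel m : Nat), Lops exp m = Lops exp (firstStop exp fuel m) := by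
  intro fuel
  induction fuel with
  | zero => intro m; rfl
  | succ fuel ih =>
    intro m
    unfold firstStop
    split
    · rename_i hc
      rw [Lops_skip exp m hc.1 hc.2]
      exact ih (m + 1)
    · rfl

theorem foldl_append_init (l : List String) : ∀ (a b : String),
    List.foldl (· ++ ·) (a ++ b) l = a ++ List.foldl (· ++ ·) b l := by
  induction l with
  | nil => intro a b; rfl
  | cons x xs ih =>
    intro a b
    simp only [List.foldl_cons, String.append_assoc, ih]

theorem join_cons' (a : String) (l : List String) :
    String.join (a :: l) = a ++ String.join l := by
  simpa [String.join] using foldl_append_init l a ""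

theorem join_take_firstStop (exp : List String) (h6 : 6 ≤ exp.length) :
    ∀ (fuel m : Nat), m ≤ 6 →
      String.join ((exp.drop m).take (firstStop exp fuel m - m)) = joinRun exp fuel m := by
  intro fuel
  induction fuel with
  | zero => intro m _; simp [firstStop, joinRun, String.join]
  | succ fuel ih =>
    intro m hm
    rw [firstStop, joinRun]
    split
    · rename_i hc
      have hlen : m < exp.length := by omega
      have hd : exp.drop m = exp[m] :: exp.drop (m + 1) := List.drop_eq_getElem_cons hlen
      have hge : m + 1 ≤ firstStop exp fuel (m + 1) := firstStop_ge exp fuel (m + 1)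
      have hdiff : firstStop exp fuel (m + 1) - m = (firstStop exp fuel (m + 1) - (m + 1)) + 1 := by
        omega
      rw [hd, hdiff, List.take_succ_cons, join_cons', ih (m + 1) (by omega),
        List.getD_eq_getElem exp "" hlen]
    · simp [String.join]

theorem innerA_spec (exp : List String) :
    ∀ (fuel i n : Nat) (s : String),
      innerA exp fuel i n s = (s ++ joinRun exp fuel (i + n), firstStop exp fuel (i + n) - i) := by
  intro fuel
  induction fuel with
  | zero =>
    intro i n s
    simp [innerA, joinRun, firstStop]
  | succ fuel ih =>
    intro i n s
    rw [innerA, joinRun, firstStop]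
    split
    · rename_i hc
      have hadd : i + n + 1 = i + (n + 1) := by omega
      rw [ih i (n + 1) _, hadd, String.append_assoc]
    · simp

-- one number-run step on the B side: the fold absorbs the gap [m, firstStop m)
theorem Bgap (exp : List String) (h6 : 6 ≤ exp.length) (m : Nat) (h : m < 6)
    (hP : exp.getD m "" ∉ OPERATORS) (out : List String) :
    Bfrom exp m out = Bfrom exp (firstStop exp 6 m) (out ++ [joinRun exp 6 m]) := by
  have hgt : m + 1 ≤ firstStop exp 6 m := firstStop_gt exp 5 m h hP
  have hle : firstStop exp 6 m ≤ 6 := firstStop_le exp 6 m (by omega)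
  have hL : Lops exp m = Lops exp (firstStop exp 6 m) := Lops_firstStop exp 6 m
  have hjoin := join_take_firstStop exp h6 6 m (by omega)
  by_cases hfs6 : firstStop exp 6 m < 6
  · -- firstStop m is an operator position
    have hop : exp.getD (firstStop exp 6 m) "" ∈ OPERATORS :=
      (firstStop_stop exp 6 m (by omega)).resolve_left (by omega)
    unfold Bfrom
    rw [hL, Lops_cons exp _ hfs6 hop]
    simp only [List.foldl_cons]
    have hstep1 : stepB exp (m, out) (firstStop exp 6 m) =
        (firstStop exp 6 m + 1, out ++ [joinRun exp 6 m] ++ [exp.getD (firstStop exp 6 m) ""]) := by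
      unfold stepB
      rw [if_pos (by omega), hjoin]
    have hstep2 : stepB exp (firstStop exp 6 m, out ++ [joinRun exp 6 m]) (firstStop exp 6 m) =
        (firstStop exp 6 m + 1, out ++ [joinRun exp 6 m] ++ [exp.getD (firstStop exp 6 m) ""]) := by
      unfold stepB
      rw [if_neg (by omega)]
    rw [hstep1, hstep2]
  · -- firstStop m = 6: no operator remains, the gap is the final tail slice
    have hfs : firstStop exp 6 m = 6 := by omega
    have hLnil : Lops exp m = [] := by rw [hL, hfs]; unfold Lops; simp
    have hL6 : Lops exp 6 = [] := by unfold Lops; simp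
    rw [hfs] at hjoin
    unfold Bfrom
    rw [hLnil, hfs, hL6]
    simp only [List.foldl_nil]
    rw [if_pos h, if_neg (by omega), hjoin]

theorem Bfrom_six (exp : List String) (out : List String) : Bfrom exp 6 out = out := by
  unfold Bfrom Lops
  simp

-- main invariant: B resumed at i equals A's outer loop at i (fuel ≥ 6 - i)
theorem mainInv (exp : List String) (h6 : 6 ≤ exp.length) :
    ∀ (fuel i : Nat) (out : List String), 6 ≤ i + fuel → i ≤ 6 →
      Bfrom exp i out = outerA exp fuel i out := by
  intro fuel
  induction fuel with
  | zero =>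
    intro i out hf hi
    have : i = 6 := by omega
    subst this
    rw [Bfrom_six]
    rfl
  | succ fuel ih =>
    intro i out hf hi
    rw [outerA]
    split
    · rename_i h
      split
      · rename_i hP
        have hstep : Bfrom exp i out = Bfrom exp (i + 1) (out ++ [exp.getD i ""]) := by
          unfold Bfrom
          rw [Lops_cons exp i h hP]
          simp only [List.foldl_cons]
          have : stepB exp (i, out) i = (i + 1, out ++ [exp.getD i ""]) := by
            unfold stepB; rw [if_neg (by omega)]
          rw [this]
        rw [hstep]
        exact ih (i + 1) _ (by omega) (by omega)
      · rename_i hP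
        rw [innerA_spec]
        simp only [Nat.add_zero, String.empty_append]
        have hgt : i + 1 ≤ firstStop exp 6 i := firstStop_gt exp 5 i h hP
        have hle : firstStop exp 6 i ≤ 6 := firstStop_le exp 6 i (by omega)
        have hadd : i + (firstStop exp 6 i - i) = firstStop exp 6 i := by omega
        rw [hadd, Bgap exp h6 i h hP out]
        exact ih (firstStop exp 6 i) _ (by omega) hle
    · rename_i h
      have : i = 6 := by omega
      subst this
      exact Bfrom_six exp out

theorem alt_eq_Bfrom (exp : List String) : concatenateExp_alt exp = Bfrom exp 0 [] := by
  unfold concatenateExp_alt Bfrom Lops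
  rw [List.range_eq_range']

-- ===== VERDICT (by name: the statement is the Claim_ definition above) =====
theorem concatenateExp_spec : Claim_equal_concatenateExp := by
  intro exp _hDom hPre
  unfold Spec_concatenateExp concatenateExp
  rw [alt_eq_Bfrom]
  exact (mainInv exp hPre 6 0 [] (by omega) (by omega)).symm
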